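-- pv_equiv track=rewrite | github.com/abraham-flores-5705/nwques | subnetgenerator.py | calcsnm
-- ===== SOURCE A (Python) =====
-- def calcsnm(addrlist):
--   full = 0xFFFFFFFF
--   bestfit = full
--   # Perform bitwise AND on all addresses in the list
--   for ind in range(len(addrlist)):
--     # Compare the current and next addresses
--     if(ind == len(addrlist) - 1):
--       continue
--     addr1i = int(addrlist[ind])
--     addr2i = int(addrlist[ind + 1])
--     # XNOR the two addresses and store the result
--     common = full - (addr1i ^ addr2i)
--     # Compare it to previous results
--     bestfit = bestfit & common
--   # Find the first 0 from left to right in the bestfit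
--   cutoff = 0
--   for ind,val in enumerate(str(bin(bestfit))[2::]):
--     if(val == '0'):
--       cutoff = ind
--       break
--   # Remove all trailing 0's
--   bestfit = bestfit >> bestfit.bit_length() - cutoff
--   # Count the remaining bits
--   bestfit = bestfit.bit_length()
--   return bestfit
-- ===== SOURCE B (Python) =====
-- def calcsnm(addrlist):
--   full = 0xFFFFFFFF
--   # One pass: AND-accumulator and OR-accumulator over the 32-bit views.
--   and_all = full
--   or_all = 0
--   for addr in addrlist:
--     v = int(addr) & full
--     and_all &= v
--     or_all |= v
--   # A bit is common to all addresses iff it is 1 everywhere or 0 everywhere.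
--   bestfit = and_all | (or_all ^ full)
--   # Prefix length = position of the first 0 in the binary expansion.
--   pos = bin(bestfit)[2:].find('0')
--   return pos if pos > 0 else 0
-- ===== Notes on version B (the rewrite author's own statement) =====
-- stated objective: simpler
-- what changed: Phase 1 replaces the adjacent-pair XNOR fold (full - (a^b) AND-ed across consecutive index pairs, with per-index list lookups) with a single pass maintaining an AND-accumulator and an OR-accumulator over the 32-bit views, combined as and_all | (or_all ^ full); phase 2 replaces the enumerate/break scan plus shift and two bit_length calls with a direct find of the first '0' in the binary string.
import Mathlib
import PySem

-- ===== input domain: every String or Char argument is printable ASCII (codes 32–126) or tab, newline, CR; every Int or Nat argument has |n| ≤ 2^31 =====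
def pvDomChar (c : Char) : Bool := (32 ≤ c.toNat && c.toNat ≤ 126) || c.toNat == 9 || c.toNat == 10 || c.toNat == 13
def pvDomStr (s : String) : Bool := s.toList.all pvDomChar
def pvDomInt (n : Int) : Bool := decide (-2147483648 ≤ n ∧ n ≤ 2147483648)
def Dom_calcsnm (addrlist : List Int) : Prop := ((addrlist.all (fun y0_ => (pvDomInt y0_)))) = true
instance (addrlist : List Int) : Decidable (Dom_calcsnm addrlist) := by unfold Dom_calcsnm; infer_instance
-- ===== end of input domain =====

-- B replaces the adjacent-pair XNOR fold by AND/OR accumulators and the enumerate/shift/bit_length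
-- tail by a direct find of the first '0' digit (objective: simpler; same O(n) cost).

-- ===== PORT A =====

-- helper shared by both ports: the binary digit list of m (no leading zeros; [] for 0) —
-- exact port of the digits produced by Python's bin() for m ≥ 0 (the only values reached here)
def natBits : Nat → List Char
  | 0 => []
  | n+1 => natBits ((n+1) / 2) ++ [if (n+1) % 2 = 1 then '1' else '0']
decreasing_by exact Nat.div_lt_self (Nat.succ_pos n) (by omega)

-- str(bin(m)) for m ≥ 0 (shared by both ports)
def pyBin (m : Nat) : List Char :=
  '0' :: 'b' :: (if m = 0 then ['0'] else natBits m)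

-- int.bit_length() for m ≥ 0 (shared by both ports)
def pyBitLen : Nat → Nat
  | 0 => 0
  | n+1 => pyBitLen ((n+1) / 2) + 1
decreasing_by exact Nat.div_lt_self (Nat.succ_pos n) (by omega)

-- A's 'for ind,val in enumerate(...): if val=='0': cutoff=ind; break' (cutoff stays 0 when no '0')
def cutLoop : List (Int × Char) → Int
  | [] => 0
  | (i, c) :: t => if c = '0' then i else cutLoop t

def calcsnm (addrlist : List Int) : Int :=
  let full : Int := 4294967295
  -- for ind in range(len(addrlist)): skip the last index, AND in full - (a[ind] ^ a[ind+1]).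
  -- addrlist[ind] is in range whenever read (ind < len-1), so pyGetD's default is never used.
  let bestfit : Int :=
    (PySem.List.pyRange 0 (addrlist.length : Int) 1).foldl
      (fun bestfit ind =>
        if ind = (addrlist.length : Int) - 1 then bestfit
        else
          let addr1i := PySem.List.pyGetD addrlist ind 0
          let addr2i := PySem.List.pyGetD addrlist (ind + 1) 0
          let common := full - (addr1i.xor addr2i)
          bestfit.land common)
      full
  -- bestfit is provably ≥ 0 on Dom, so bin()/bit_length()/>> act on bestfit.toNat faithfully;
  -- the shift amount is provably ≥ 0 on Dom (Python would raise on a negative shift).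
  let cutoff : Int :=
    cutLoop (PySem.List.enumerate (PySem.List.slice (pyBin bestfit.toNat) (some 2) none) 0)
  let bestfit2 : Int := bestfit >>> ((pyBitLen bestfit.toNat : Int) - cutoff)
  (pyBitLen bestfit2.toNat : Int)

-- ===== PORT B =====

-- str.find('0'): first index of '0' in the digit list, -1 when absent (exact for a 1-char needle)
def findPos : List Char → Int → Int
  | [], _ => -1
  | c :: t, i => if c = '0' then i else findPos t (i + 1)

def calcsnm_alt (addrlist : List Int) : Int :=
  let full : Int := 4294967295
  let acc : Int × Int :=
    addrlist.foldl
      (fun (p : Int × Int) addr =>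
        let v := addr.land full
        (p.1.land v, p.2.lor v))
      (full, 0)
  let bestfit : Int := acc.1.lor (acc.2.xor full)
  let pos : Int := findPos (PySem.List.slice (pyBin bestfit.toNat) (some 2) none) 0
  if pos > 0 then pos else 0

-- ===== PRECONDITION & SPEC =====
def Spec_calcsnm (addrlist : List Int) (out : Int) : Prop := out = calcsnm_alt addrlist
instance (addrlist : List Int) (out : Int) : Decidable (Spec_calcsnm addrlist out) := by unfold Spec_calcsnm; infer_instance

-- ===== CLAIM (what is proved, stated in full; the proofs are below) =====
def Claim_equal_calcsnm : Prop := ∀ (addrlist : List Int), Dom_calcsnm addrlist → Spec_calcsnm addrlist (calcsnm addrlist)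

-- ===== LEMMAS AND PROOFS =====

-- ---- generic Int bit toolkit ----

theorem tb_and (a b : Int) (i : Nat) : (a.land b).testBit i = (a.testBit i && b.testBit i) :=
  Int.testBit_land a b i

theorem tb_or (a b : Int) (i : Nat) : (a.lor b).testBit i = (a.testBit i || b.testBit i) :=
  Int.testBit_lor a b i

theorem tb_xor (a b : Int) (i : Nat) : (a.xor b).testBit i = (a.testBit i ^^ b.testBit i) :=
  Int.testBit_lxor a b i

theorem tb_natCast (a : Nat) (i : Nat) : (a : Int).testBit i = a.testBit i := rfl

theorem tb_negSucc (m : Nat) (i : Nat) : (Int.negSucc m).testBit i = !(m.testBit i) := rfl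

theorem tb_full (i : Nat) : (4294967295 : Int).testBit i = decide (i < 32) := by
  have h : (4294967295 : Int) = ((4294967295 : Nat) : Int) := rfl
  rw [h, tb_natCast]
  have h2 : (4294967295 : Nat) = 2 ^ 32 - (0 + 1) := by norm_num
  rw [h2, Nat.testBit_two_pow_sub_succ (by norm_num)]
  simp

theorem tb_zero (i : Nat) : (0 : Int).testBit i = false := by
  have h : (0 : Int) = ((0 : Nat) : Int) := rfl
  rw [h, tb_natCast, Nat.zero_testBit]

-- a value whose bits from 32 on are all clear is a Nat below 2^32
theorem bounds_of_bits (x : Int) (h : ∀ j, 32 ≤ j → x.testBit j = false) :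
    0 ≤ x ∧ x < 4294967296 := by
  cases x with
  | ofNat a =>
    constructor
    · exact Int.ofNat_nonneg a
    · have ha : a < 2 ^ 32 := by
        apply Nat.lt_pow_two_of_testBit
        intro i hi
        have := h i hi
        rwa [show (Int.ofNat a) = ((a : Nat) : Int) from rfl, tb_natCast] at this
      have : (a : Int) < (4294967296 : Int) := by exact_mod_cast ha
      exact this
  | negSucc m =>
    exfalso
    have hm : m.testBit (32 + m) = false :=
      Nat.testBit_eq_false_of_lt (lt_of_lt_of_le Nat.lt_two_pow_self
        (Nat.pow_le_pow_right (by norm_num) (by omega)))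
    have := h (32 + m) (by omega)
    rw [tb_negSucc, hm] at this
    simp at this

theorem eq_of_bits (x y : Int)
    (hx : ∀ j, 32 ≤ j → x.testBit j = false) (hy : ∀ j, 32 ≤ j → y.testBit j = false)
    (h : ∀ i, i < 32 → x.testBit i = y.testBit i) : x = y := by
  obtain ⟨hx0, _⟩ := bounds_of_bits x hx
  obtain ⟨hy0, _⟩ := bounds_of_bits y hy
  cases x with
  | ofNat a =>
    cases y with
    | ofNat b =>
      have : a = b := by
        apply Nat.eq_of_testBit_eq
        intro i
        by_cases hi : i < 32
        · exact h i hi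
        · have h1 : a.testBit i = false := hx i (by omega)
          have h2 : b.testBit i = false := hy i (by omega)
          rw [h1, h2]
      exact congrArg Int.ofNat this
    | negSucc m => exact absurd hy0 (by simp)
  | negSucc m => exact absurd hx0 (by simp)

-- sign-extension: for |a| ≤ 2^31 the bits from 32 on are the sign bit
theorem tb_high (a : Int) (ha : pvDomInt a = true) :
    ∀ j, 32 ≤ j → a.testBit j = decide (a < 0) := by
  intro j hj
  have hdom : -2147483648 ≤ a ∧ a ≤ 2147483648 := by
    simpa [pvDomInt] using ha
  cases a with
  | ofNat v =>
    have hv : v ≤ 2147483648 := by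
      have := hdom.2
      rw [Int.ofNat_eq_natCast] at this
      exact_mod_cast this
    have hlt : v < 2 ^ j :=
      lt_of_le_of_lt hv (lt_of_lt_of_le (by norm_num)
        (Nat.pow_le_pow_right (by norm_num) hj))
    have h1 : (Int.ofNat v).testBit j = v.testBit j := rfl
    rw [h1, Nat.testBit_eq_false_of_lt hlt]
    simp [not_lt.mpr (Int.natCast_nonneg v)]
  | negSucc m =>
    have hm : m < 2147483648 := by
      have := hdom.1
      rw [Int.negSucc_eq] at this
      omega
    have hlt : m < 2 ^ j :=
      lt_of_lt_of_le hm (le_trans (by norm_num)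
        (Nat.pow_le_pow_right (by norm_num) hj))
    rw [tb_negSucc, Nat.testBit_eq_false_of_lt hlt]
    simp [Int.negSucc_lt_zero]

-- a ^ b stays within [-2^32, 2^32) for Dom values
theorem xor_bounds (a b : Int) (ha : pvDomInt a = true) (hb : pvDomInt b = true) :
    -4294967296 ≤ a.xor b ∧ a.xor b < 4294967296 := by
  have hhigh : ∀ j, 32 ≤ j → (a.xor b).testBit j = (decide (a < 0) ^^ decide (b < 0)) := by
    intro j hj
    rw [tb_xor, tb_high a ha j hj, tb_high b hb j hj]
  by_cases hs : (decide (a < 0) ^^ decide (b < 0)) = false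
  · have := bounds_of_bits (a.xor b) (fun j hj => by rw [hhigh j hj, hs])
    exact ⟨by omega, this.2⟩
  · have hs' : (decide (a < 0) ^^ decide (b < 0)) = true := by
      cases h : (decide (a < 0) ^^ decide (b < 0)) <;> simp_all
    cases hx : a.xor b with
    | ofNat v =>
      exfalso
      have hv : v.testBit (32 + v) = false :=
        Nat.testBit_eq_false_of_lt (lt_of_lt_of_le Nat.lt_two_pow_self
          (Nat.pow_le_pow_right (by norm_num) (by omega)))
      have hthis := hhigh (32 + v) (by omega)
      rw [hx, show (Int.ofNat v).testBit (32 + v) = v.testBit (32 + v) from rfl,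
        hv, hs'] at hthis
      exact absurd hthis (by simp)
    | negSucc m =>
      have hm : m < 4294967296 := by
        by_contra hge
        push_neg at hge
        have h32 : (2 ^ 32 : Nat) ≤ m := by norm_num; omega
        obtain ⟨i, hige, hbit⟩ := Nat.exists_ge_and_testBit_of_ge_two_pow h32
        have hthis := hhigh i (by omega)
        rw [hx, tb_negSucc, hbit, hs'] at hthis
        exact absurd hthis (by simp)
      rw [Int.negSucc_eq]
      constructor <;> omega

-- low 32 bits of 4294967295 - x are the complement of x's
theorem tb_xnor (x : Int) (h1 : -4294967296 ≤ x) (h2 : x < 4294967296)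
    (i : Nat) (hi : i < 32) : (4294967295 - x).testBit i = !(x.testBit i) := by
  cases x with
  | ofNat v =>
    have hv : v < 4294967296 := by
      rw [Int.ofNat_eq_natCast] at h2
      exact_mod_cast h2
    have heq : (4294967295 : Int) - Int.ofNat v = (((2 ^ 32 - (v + 1) : Nat)) : Int) := by
      rw [Int.ofNat_eq_natCast]
      omega
    rw [heq, tb_natCast, Nat.testBit_two_pow_sub_succ (by omega : v < 2 ^ 32),
      show (Int.ofNat v).testBit i = v.testBit i from rfl]
    simp [hi]
  | negSucc m =>
    have hm : m < 4294967296 := by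
      rw [Int.negSucc_eq] at h1
      omega
    have heq : (4294967295 : Int) - Int.negSucc m = (((2 ^ 32 * 1 + m : Nat)) : Int) := by
      rw [Int.negSucc_eq]
      have h3 : (2 ^ 32 * 1 + m : Nat) = 4294967296 + m := by norm_num
      rw [h3]
      omega
    rw [heq, tb_natCast, Nat.testBit_two_pow_mul_add 1 (by omega : m < 2 ^ 32), tb_negSucc]
    simp [hi]

-- ---- phase 1: both folds have the same bits ----

-- A's indexed loop is the fold over adjacent pairs
theorem loopA_eq (l : List Int) :
    (PySem.List.pyRange 0 (l.length : Int) 1).foldl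
      (fun (bestfit : Int) ind =>
        if ind = (l.length : Int) - 1 then bestfit
        else bestfit.land (4294967295 -
          ((PySem.List.pyGetD l ind 0).xor (PySem.List.pyGetD l (ind + 1) 0))))
      4294967295
    = (l.zip l.tail).foldl (fun (bf : Int) (p : Int × Int) => bf.land (4294967295 - (p.1.xor p.2))) 4294967295 := by
  cases l with
  | nil => rw [PySem.List.pyRange_one_eq_nil (by simp)]; simp
  | cons hd t =>
    set l := hd :: t with hl
    have hlen : (1 : Int) ≤ (l.length : Int) := by simp [hl]
    have hz : ((l.zip l.tail).length : Int) = (l.length : Int) - 1 := by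
      simp [List.length_zip, hl]
    have hsplit : PySem.List.pyRange 0 ((l.length : Int)) 1
        = PySem.List.pyRange 0 ((l.length : Int) - 1) 1 ++ [(l.length : Int) - 1] := by
      have h := PySem.List.pyRange_one_succ_right
        (a := 0) (b := (l.length : Int) - 1) (by omega)
      have h2 : (l.length : Int) - 1 + 1 = (l.length : Int) := by ring
      rwa [h2] at h
    rw [hsplit, List.foldl_append, List.foldl_cons, List.foldl_nil, if_pos rfl]
    have hcong : ∀ (acc : Int), ∀ x ∈ PySem.List.pyRange 0 ((l.length : Int) - 1) 1,
        (fun (bestfit : Int) ind =>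
          if ind = (l.length : Int) - 1 then bestfit
          else bestfit.land (4294967295 -
            ((PySem.List.pyGetD l ind 0).xor (PySem.List.pyGetD l (ind + 1) 0)))) acc x
        = (fun (acc : Int) j => acc.land (4294967295 -
            ((PySem.List.pyGetD (l.zip l.tail) j (0, 0)).1.xor
             (PySem.List.pyGetD (l.zip l.tail) j (0, 0)).2))) acc x := by
      intro acc x hx
      rw [PySem.List.mem_pyRange_one] at hx
      obtain ⟨hx0, hx1⟩ := hx
      have hne : x ≠ (l.length : Int) - 1 := by omega
      simp only [if_neg hne]
      have hxlt : x < (l.length : Int) := by omega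
      have hx1lt : x + 1 < (l.length : Int) := by omega
      have hxz : x < ((l.zip l.tail).length : Int) := by omega
      rw [PySem.List.pyGetD_eq_getElem l 0 hx0 hxlt,
        PySem.List.pyGetD_eq_getElem l 0 (by omega) hx1lt,
        PySem.List.pyGetD_eq_getElem (l.zip l.tail) (0, 0) hx0 hxz]
      have htn : (x + 1).toNat = x.toNat + 1 := by omega
      simp only [List.getElem_zip, List.getElem_tail, htn]
    rw [PySem.List.foldl_congr_mem _ _ _ _ hcong]
    rw [show ((l.length : Int) - 1) = ((l.zip l.tail).length : Int) from hz.symm]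
    exact PySem.List.foldl_pyRange_zero_pyGetD' (l.zip l.tail) (0, 0)
      (fun (bf : Int) (p : Int × Int) => bf.land (4294967295 - (p.1.xor p.2))) 4294967295

-- the adjacent-pair fold, per bit: all later elements agree with the head
theorem chainBit (i : Nat) (hi : i < 32) (t : List Int) :
    ∀ (hd init : Int), (∀ x ∈ hd :: t, pvDomInt x = true) →
      (((hd :: t).zip t).foldl (fun (bf : Int) (p : Int × Int) => bf.land (4294967295 - (p.1.xor p.2))) init).testBit i
        = (init.testBit i && t.all (fun x => x.testBit i == hd.testBit i)) := by
  induction t with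
  | nil => intro hd init h; simp
  | cons b t ih =>
    intro hd init h
    have hhd : pvDomInt hd = true := h hd (by simp)
    have hb : pvDomInt b = true := h b (by simp)
    have hxb := xor_bounds hd b hhd hb
    rw [List.zip_cons_cons, List.foldl_cons,
      ih b _ (fun x hx => h x (by simp at hx ⊢; tauto)),
      tb_and, tb_xnor _ hxb.1 hxb.2 i hi, tb_xor]
    simp only [List.all_cons]
    cases h1 : hd.testBit i <;> cases h2 : b.testBit i <;>
      simp [h1, h2, Bool.and_assoc]

-- bits from 32 on stay clear through any AND-fold
theorem andFold_high {α : Type} (t : α → Int) (l : List α) (init : Int) (j : Nat)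
    (h : init.testBit j = false) :
    (l.foldl (fun acc x => acc.land (t x)) init).testBit j = false := by
  induction l generalizing init with
  | nil => exact h
  | cons b l ih => exact ih _ (by rw [tb_and, h]; simp)

theorem orFold_high (l : List Int) (init : Int) (j : Nat) (hj : 32 ≤ j)
    (h : init.testBit j = false) :
    (l.foldl (fun (acc : Int) (x : Int) => acc.lor (x.land 4294967295)) init).testBit j = false := by
  induction l generalizing init with
  | nil => exact h
  | cons b l ih =>
    refine ih _ ?_
    rw [tb_or, h, tb_and, tb_full]
    have hd : decide (j < 32) = false := decide_eq_false (by omega)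
    rw [hd]
    simp

-- B's AND accumulator, per bit
theorem andBit (i : Nat) (hi : i < 32) (l : List Int) :
    ∀ init : Int,
      (l.foldl (fun (acc : Int) (x : Int) => acc.land (x.land 4294967295)) init).testBit i
        = (init.testBit i && l.all (fun x => x.testBit i)) := by
  induction l with
  | nil => intro init; simp
  | cons b l ih =>
    intro init
    rw [List.foldl_cons, ih, tb_and, tb_and, tb_full]
    simp [hi, Bool.and_assoc]

-- B's OR accumulator, per bit
theorem orBit (i : Nat) (hi : i < 32) (l : List Int) :
    ∀ init : Int,
      (l.foldl (fun (acc : Int) (x : Int) => acc.lor (x.land 4294967295)) init).testBit i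
        = (init.testBit i || l.any (fun x => x.testBit i)) := by
  induction l with
  | nil => intro init; simp
  | cons b l ih =>
    intro init
    rw [List.foldl_cons, ih, tb_or, tb_and, tb_full]
    simp [hi, Bool.or_assoc]

-- a fold with a product accumulator splits into two folds
theorem prodFold {α : Type} (g1 g2 : Int → α → Int) (l : List α) :
    ∀ (a b : Int),
      l.foldl (fun (p : Int × Int) x => (g1 p.1 x, g2 p.2 x)) (a, b)
        = (l.foldl g1 a, l.foldl g2 b) := by
  induction l with
  | nil => intro a b; rfl
  | cons c l ih => intro a b; exact ih _ _

-- bits from 32 on of B's combined value are clear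
theorem bestfitB_high (l : List Int) (j : Nat) (hj : 32 ≤ j) :
    (((l.foldl (fun (acc : Int) (x : Int) => acc.land (x.land 4294967295)) 4294967295).lor
      ((l.foldl (fun (acc : Int) (x : Int) => acc.lor (x.land 4294967295)) 0).xor 4294967295))).testBit j
      = false := by
  rw [tb_or, tb_xor,
    andFold_high (fun x : Int => x.land 4294967295) _ _ j
      (by rw [tb_full]; exact decide_eq_false (by omega)),
    orFold_high l 0 j hj (tb_zero j), tb_full,
    show decide (j < 32) = false from decide_eq_false (by omega)]
  simp

-- the two phase-1 results are equal
theorem bestfit_eq (l : List Int) (hdom : Dom_calcsnm l) :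
    (l.zip l.tail).foldl (fun (bf : Int) (p : Int × Int) => bf.land (4294967295 - (p.1.xor p.2))) 4294967295
      = (l.foldl (fun (acc : Int) (x : Int) => acc.land (x.land 4294967295)) 4294967295).lor
        ((l.foldl (fun (acc : Int) (x : Int) => acc.lor (x.land 4294967295)) 0).xor 4294967295) := by
  have hmem : ∀ x ∈ l, pvDomInt x = true := by
    intro x hx
    unfold Dom_calcsnm at hdom
    rw [List.all_eq_true] at hdom
    exact hdom x hx
  apply eq_of_bits
  · intro j hj
    exact andFold_high (fun p : Int × Int => 4294967295 - (p.1.xor p.2)) _ _ j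
      (by rw [tb_full]; exact decide_eq_false (by omega))
  · intro j hj
    exact bestfitB_high l j hj
  · intro i hi
    cases l with
    | nil =>
      simp only [List.zip_nil_right, List.foldl_nil]
      simp [tb_or, tb_xor, tb_full, tb_zero]
    | cons hd t =>
      simp only [List.tail_cons]
      rw [chainBit i hi t hd 4294967295 hmem,
        tb_or, tb_xor, List.foldl_cons, List.foldl_cons]
      have ha := andBit i hi (hd :: t) 4294967295
      have ho := orBit i hi (hd :: t) 0
      rw [List.foldl_cons] at ha ho
      rw [ha, ho, tb_full, tb_zero]
      have hd32 : decide (i < 32) = true := decide_eq_true hi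
      rw [hd32]
      cases h1 : hd.testBit i <;>
        simp [h1, List.all_cons, List.any_cons, List.all_eq_not_any_not]

-- ---- phase 2: the scan/shift/bit_length tail equals the find ----

def fz : List Char → Option Nat
  | [] => none
  | c :: t => if c = '0' then some 0 else (fz t).map (· + 1)

theorem cutLoop_eq (l : List Char) : ∀ s : Int,
    cutLoop (PySem.List.enumerate l s)
      = (match fz l with | some c => s + (c : Int) | none => 0) := by
  induction l with
  | nil => intro s; rfl
  | cons c t ih =>
    intro s
    rw [PySem.List.enumerate_cons]
    by_cases hc : c = '0'
    · simp [cutLoop, fz, hc]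
    · simp only [cutLoop, fz, if_neg hc, ih (s + 1)]
      cases h : fz t <;> simp <;> push_cast <;> ring

theorem findPos_eq (l : List Char) : ∀ s : Int,
    findPos l s = (match fz l with | some c => s + (c : Int) | none => -1) := by
  induction l with
  | nil => intro s; rfl
  | cons c t ih =>
    intro s
    by_cases hc : c = '0'
    · simp [findPos, fz, hc]
    · simp only [findPos, fz, if_neg hc, ih (s + 1)]
      cases h : fz t <;> simp <;> push_cast <;> ring

theorem fz_lt (l : List Char) : ∀ c : Nat, fz l = some c → c < l.length := by
  induction l with
  | nil => intro c h; simp [fz] at h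
  | cons a t ih =>
    intro c h
    by_cases ha : a = '0'
    · simp [fz, ha] at h; simp [← h]
    · simp only [fz, if_neg ha, Option.map_eq_some_iff] at h
      obtain ⟨c', hc', rfl⟩ := h
      have := ih c' hc'
      simp; omega

theorem lenBits (n : Nat) : (natBits n).length = pyBitLen n := by
  induction n using Nat.strong_induction_on with
  | _ n ih =>
    cases n with
    | zero => simp [natBits, pyBitLen]
    | succ m =>
      rw [natBits, pyBitLen, List.length_append, List.length_singleton,
        ih ((m + 1) / 2) (Nat.div_lt_self (Nat.succ_pos m) (by omega))]

theorem natBits_div2 (n : Nat) : natBits (n / 2) = (natBits n).dropLast := by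
  cases n with
  | zero => simp [natBits]
  | succ m => rw [natBits, List.dropLast_concat]

theorem natBits_shift (n : Nat) : ∀ k : Nat,
    natBits (n >>> k) = (natBits n).take ((natBits n).length - k) := by
  intro k
  induction k with
  | zero => simp
  | succ k ih =>
    rw [Nat.shiftRight_succ, natBits_div2, ih, List.dropLast_eq_take, List.take_take,
      List.length_take]
    congr 1
    omega

theorem natBits_head (n : Nat) (hn : n ≠ 0) : (natBits n).head? = some '1' := by
  induction n using Nat.strong_induction_on with
  | _ n ih =>
    cases n with
    | zero => exact absurd rfl hn
    | succ m =>
      rw [natBits]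
      by_cases h2 : (m + 1) / 2 = 0
      · have hm : m = 0 := by omega
        subst hm
        simp [h2, natBits]
      · rw [List.head?_append, ih ((m + 1) / 2) (Nat.div_lt_self (Nat.succ_pos m) (by omega)) h2]
        rfl

-- the full phase-2 equality, on the common bestfit value
theorem phase2_eq (n : Nat) :
    (pyBitLen ((((n : Int)) >>> ((pyBitLen n : Int)
        - cutLoop (PySem.List.enumerate (PySem.List.slice (pyBin n) (some 2) none) 0))).toNat) : Int)
    = (if findPos (PySem.List.slice (pyBin n) (some 2) none) 0 > 0
        then findPos (PySem.List.slice (pyBin n) (some 2) none) 0 else 0) := by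
  have hslice : PySem.List.slice (pyBin n) (some 2) none
      = (if n = 0 then ['0'] else natBits n) := by
    rw [PySem.List.slice_from _ (by norm_num)]
    simp [pyBin]
  rw [hslice, cutLoop_eq, findPos_eq]
  by_cases hn : n = 0
  · subst hn
    have hfz : fz (if 0 = 0 then ['0'] else natBits 0) = some 0 := by simp [fz]
    rw [hfz]
    have hsh : ((pyBitLen 0 : Nat) : Int) - (0 + ((0 : Nat) : Int)) = ((0 : Nat) : Int) := by
      simp [pyBitLen]
    rw [hsh, Int.shiftRight_natCast, Int.toNat_natCast]
    simp [pyBitLen]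
  · simp only [if_neg hn]
    have hhead := natBits_head n hn
    obtain ⟨tl, htl⟩ : ∃ tl, natBits n = '1' :: tl := by
      cases hnb : natBits n with
      | nil => rw [hnb] at hhead; simp at hhead
      | cons a tl =>
        rw [hnb] at hhead
        simp at hhead
        exact ⟨tl, by rw [hhead]⟩
    have hL := lenBits n
    cases hfz : fz (natBits n) with
    | none =>
      dsimp only
      have hsh : ((pyBitLen n : Nat) : Int) - 0 = ((pyBitLen n : Nat) : Int) := by ring
      rw [hsh, Int.shiftRight_natCast, Int.toNat_natCast]
      have hnil : natBits (n >>> pyBitLen n) = [] := by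
        rw [natBits_shift, hL]
        simp
      have hplz : pyBitLen (n >>> pyBitLen n) = 0 := by
        rw [← lenBits, hnil]
        rfl
      rw [hplz]
      norm_num
    | some c =>
      dsimp only
      have hc1 : 1 ≤ c := by
        rw [htl] at hfz
        simp only [fz, if_neg (by decide : ¬ ('1' = '0')), Option.map_eq_some_iff] at hfz
        obtain ⟨c', _, hc'⟩ := hfz
        omega
      have hclt : c < (natBits n).length := fz_lt _ c hfz
      have hsh : ((pyBitLen n : Nat) : Int) - (0 + (c : Int)) = (((pyBitLen n - c : Nat)) : Int) := by
        have hcle : c ≤ pyBitLen n := by omega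
        omega
      rw [hsh, Int.shiftRight_natCast, Int.toNat_natCast]
      have hval : pyBitLen (n >>> (pyBitLen n - c)) = c := by
        rw [← lenBits, natBits_shift, hL, List.length_take]
        omega
      rw [hval]
      rw [if_pos (by omega : (0 : Int) + (c : Int) > 0)]
      exact (zero_add _).symm

-- ===== VERDICT (by name: the statement is the Claim_ definition above) =====
theorem calcsnm_spec : Claim_equal_calcsnm := by
  intro l hdom
  unfold Spec_calcsnm
  show calcsnm l = calcsnm_alt l
  simp only [calcsnm, calcsnm_alt]
  rw [prodFold (fun (acc : Int) (x : Int) => acc.land (x.land 4294967295))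
    (fun (acc : Int) (x : Int) => acc.lor (x.land 4294967295)) l 4294967295 0]
  rw [loopA_eq l, bestfit_eq l hdom]
  set M : Int := ((l.foldl (fun (acc : Int) (x : Int) => acc.land (x.land 4294967295)) 4294967295).lor
      ((l.foldl (fun (acc : Int) (x : Int) => acc.lor (x.land 4294967295)) 0).xor 4294967295)) with hMdef
  have h0 : 0 ≤ M := (bounds_of_bits M (fun j hj => bestfitB_high l j hj)).1
  have hM : M = ((M.toNat : Nat) : Int) := (Int.toNat_of_nonneg h0).symm
  have key := phase2_eq M.toNat
  rw [← hM] at key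
  exact key
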